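-- pv_equiv track=rewrite | github.com/jimorie/cthulhucli | convert-lcg-sources.py | decode_html
-- ===== SOURCE A (Python) =====
-- def decode_html(text):
--     cur = None
--     beg = 0
--     while True:
--         end = text.find("<", beg)
--         if end >= 0:
--             if cur:
--                 yield f"<{cur}>{text[beg:end]}</{cur}>"
--             else:
--                 yield text[beg:end]
--             beg = end
--             end = text.index(">", beg) + 1
--             tag = text[beg:end]
--             if "italic" in tag:
--                 cur = "subtype"
--             elif "bold" in tag:
--                 cur = "keyword"
--             else:
--                 cur = None
--             beg = end
--         else:
--             if beg < len(text):
--                 if cur: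
--                     yield f"<{cur}>{text[beg:]}</{cur}>"
--                 else:
--                     yield text[beg:]
--             break
-- ===== SOURCE B (Python) =====
-- def decode_html(text):
--     # Single-pass character state machine (no string searching); yields the same stream as A.
--     def emit(seg):
--         return f"<{cur}>{seg}</{cur}>" if cur else seg
--     cur = None
--     buf = []
--     intag = False
--     tagbuf = []
--     for ch in text:
--         if intag:
--             if ch == ">":
--                 tag = "".join(tagbuf)
--                 cur = "subtype" if "italic" in tag else "keyword" if "bold" in tag else None
--                 tagbuf = []
--                 intag = False
--             else:
--                 tagbuf.append(ch)
--         elif ch == "<":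
--             yield emit("".join(buf))
--             buf = []
--             intag = True
--         else:
--             buf.append(ch)
--     if not intag and buf:
--         yield emit("".join(buf))
-- ===== Notes on version B (the rewrite author's own statement) =====
-- stated objective: alternative
-- what changed: Replaces A's find/index position arithmetic with string slicing by a single-pass per-character state machine (text/tag modes with accumulating buffers, no searching primitives).
-- outside the precondition, e.g. on decode_html('<'): A raises ValueError, B returns ['']
import Mathlib
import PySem

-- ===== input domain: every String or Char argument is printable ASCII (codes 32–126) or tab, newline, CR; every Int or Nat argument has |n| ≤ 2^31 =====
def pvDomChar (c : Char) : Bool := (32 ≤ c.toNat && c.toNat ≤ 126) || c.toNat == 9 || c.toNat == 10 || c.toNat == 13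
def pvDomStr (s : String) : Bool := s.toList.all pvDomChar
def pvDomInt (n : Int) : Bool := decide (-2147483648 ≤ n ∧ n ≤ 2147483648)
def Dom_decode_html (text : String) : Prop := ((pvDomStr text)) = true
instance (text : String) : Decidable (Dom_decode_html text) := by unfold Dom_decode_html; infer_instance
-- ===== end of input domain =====

-- B replaces A's find/index position arithmetic by a one-pass character state machine; objective: alternative (same cost).
-- Both Pythons are generators; the ports return the list of yielded strings.

-- ===== PORT A =====
-- A scans with text.find("<", beg) / text.index(">", beg) and slices; fuel only makes the while-loop total.
def decode_html_loop (s : List Char) (cur : Option (List Char)) (beg : Nat) : Nat → List String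
  | 0 => []
  | fuel+1 =>
    let e := PySem.Chars.findFrom s ['<'] (beg : Int) none
    if 0 ≤ e then
      let seg := PySem.Chars.slice s (some (beg : Int)) (some e)
      let piece := match cur with
        | some c => String.ofList ('<' :: c ++ '>' :: seg ++ '<' :: '/' :: c ++ ['>'])
        | none => String.ofList seg
      let e2 := PySem.Chars.findFrom s ['>'] e none
      if e2 = -1 then [piece]  -- Python: text.index raises ValueError here (outside Pre_)
      else
        let tag := PySem.Chars.slice s (some e) (some (e2 + 1))
        let cur' := if PySem.Chars.isIn "italic".toList tag then some "subtype".toList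
                    else if PySem.Chars.isIn "bold".toList tag then some "keyword".toList
                    else none
        piece :: decode_html_loop s cur' (e2 + 1).toNat fuel
    else
      if beg < s.length then
        [match cur with
         | some c => String.ofList ('<' :: c ++ '>' :: (PySem.Chars.slice s (some (beg : Int)) none) ++ '<' :: '/' :: c ++ ['>'])
         | none => String.ofList (PySem.Chars.slice s (some (beg : Int)) none)]
      else []

def decode_html (text : String) : List String :=
  decode_html_loop text.toList none 0 (text.toList.length + 1)

-- ===== PORT B =====
def decode_html_alt_emit (cur : Option (List Char)) (seg : List Char) : String :=
  match cur with
  | some c => String.ofList ('<' :: c ++ '>' :: seg ++ '<' :: '/' :: c ++ ['>'])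
  | none => String.ofList seg

def decode_html_alt_classify (tag : List Char) : Option (List Char) :=
  if PySem.Chars.isIn "italic".toList tag then some "subtype".toList
  else if PySem.Chars.isIn "bold".toList tag then some "keyword".toList
  else none

def decode_html_alt_go : List Char → Option (List Char) → List Char → Bool → List Char → List String → List String
  | [], cur, buf, intag, _tagbuf, out =>
      if intag = false ∧ buf ≠ [] then out ++ [decode_html_alt_emit cur buf] else out
  | ch :: rest, cur, buf, intag, tagbuf, out =>
      if intag then
        if ch = '>' then decode_html_alt_go rest (decode_html_alt_classify tagbuf) buf false [] out
        else decode_html_alt_go rest cur buf intag (tagbuf ++ [ch]) out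
      else if ch = '<' then
        decode_html_alt_go rest cur [] true [] (out ++ [decode_html_alt_emit cur buf])
      else decode_html_alt_go rest cur (buf ++ [ch]) intag tagbuf out

def decode_html_alt (text : String) : List String :=
  decode_html_alt_go text.toList none [] false [] []

-- ===== PRECONDITION & SPEC =====
-- Pre_ excludes exactly the strings with an unterminated '<' (no '>' at or after it): there A's text.index(">") raises ValueError.
def Pre_decode_html (text : String) : Prop :=
  ∀ i, i < text.toList.length → text.toList.getD i ' ' = '<' → '>' ∈ text.toList.drop i
instance (text : String) : Decidable (Pre_decode_html text) := by unfold Pre_decode_html; infer_instance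
def pvWitness_decode_html : String := "a<i>b"

def Spec_decode_html (text : String) (out : List String) : Prop := out = decode_html_alt text
instance (text : String) (out : List String) : Decidable (Spec_decode_html text out) := by unfold Spec_decode_html; infer_instance

-- ===== CLAIM (what is proved, stated in full; the proofs are below) =====
def Claim_equal_decode_html : Prop := ∀ (text : String), Dom_decode_html text → Pre_decode_html text → Spec_decode_html text (decode_html text)

-- ===== LEMMAS AND PROOFS =====

-- the suffix form of Pre_
def pvP (t : List Char) : Prop := ∀ u v, t = u ++ '<' :: v → '>' ∈ v

theorem pvP_of_pre (text : String) (h : Pre_decode_html text) : pvP text.toList := by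
  intro u v hv
  have hi : u.length < text.toList.length := by rw [hv]; simp
  have hd : text.toList.getD u.length ' ' = '<' := by
    rw [hv, List.getD_eq_getElem?_getD, List.getElem?_append_right (le_refl _)]
    simp
  have hm := h u.length hi hd
  rw [hv, List.drop_left] at hm
  rcases List.mem_cons.mp hm with h1 | h1
  · exact absurd h1 (by decide)
  · exact h1

theorem pvP_suffix (a t v : List Char) (h : t = a ++ v) (hp : pvP t) : pvP v := by
  intro u w hw
  exact hp (a ++ u) w (by rw [h, hw, List.append_assoc])

theorem pv_first_split (c : Char) (t : List Char) (h : c ∈ t) :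
    ∃ pre rest, t = pre ++ c :: rest ∧ c ∉ pre := by
  induction t with
  | nil => simp at h
  | cons x xs ih =>
    by_cases hx : x = c
    · exact ⟨[], xs, by simp [hx], by simp⟩
    · have hm : c ∈ xs := by
        rcases List.mem_cons.mp h with h1 | h1
        · exact absurd h1.symm hx
        · exact h1
      obtain ⟨pre, rest, hrw, hnot⟩ := ih hm
      exact ⟨x :: pre, rest, by simp [hrw], by
        simp only [List.mem_cons, not_or]
        exact ⟨fun hc => hx hc.symm, hnot⟩⟩

theorem pv_find_none (c : Char) (t : List Char) (h : c ∉ t) :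
    PySem.Chars.find t [c] = -1 := by
  rw [PySem.Chars.find_eq_neg_one_iff]
  rintro ⟨s, u, hs⟩
  exact h (by rw [← hs]; simp)

theorem pv_find_first (c : Char) (pre rest : List Char) (h : c ∉ pre) :
    PySem.Chars.find (pre ++ c :: rest) [c] = (pre.length : Int) := by
  have hinf : [c] <:+: (pre ++ c :: rest) := ⟨pre, rest, by simp⟩
  have hne : PySem.Chars.find (pre ++ c :: rest) [c] ≠ -1 := by
    rw [ne_eq, PySem.Chars.find_eq_neg_one_iff]; exact fun hn => hn hinf
  have h0 : 0 ≤ PySem.Chars.find (pre ++ c :: rest) [c] := by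
    have := PySem.Chars.neg_one_le_find (pre ++ c :: rest) [c]
    omega
  obtain ⟨hpref, hmin⟩ := PySem.Chars.find_spec h0
  set j := (PySem.Chars.find (pre ++ c :: rest) [c]).toNat with hj
  have hle : j ≤ pre.length := by
    by_contra hlt
    exact hmin pre.length (by omega) (by rw [List.drop_left]; exact ⟨rest, rfl⟩)
  have hge : ¬ j < pre.length := by
    intro hlt
    have hdrop : (pre ++ c :: rest).drop j = pre.drop j ++ c :: rest :=
      List.drop_append_of_le_length (by omega)
    rw [hdrop] at hpref
    obtain ⟨u, hu⟩ := hpref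
    have hpd : pre.drop j ≠ [] := by
      intro hn
      have : pre.length ≤ j := by
        have := List.drop_eq_nil_iff.mp hn
        omega
      omega
    obtain ⟨y, ys, hys⟩ := List.exists_cons_of_ne_nil hpd
    have hyc : y = c := by
      rw [hys] at hu
      simpa using congrArg List.head? hu.symm
    have : c ∈ pre := by
      rw [← hyc]
      exact List.mem_of_mem_drop (hys ▸ List.mem_cons_self)
    exact h this
  omega

theorem pv_infix_wrap (p g : List Char) (hne : p ≠ []) (h1 : '<' ∉ p) (h2 : '>' ∉ p) :
    p <:+: ('<' :: (g ++ ['>'])) ↔ p <:+: g := by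
  constructor
  · rintro ⟨l, r, hl⟩
    cases l with
    | nil =>
      simp only [List.nil_append] at hl
      obtain ⟨y, ys, hys⟩ := List.exists_cons_of_ne_nil hne
      rw [hys] at hl
      have : y = '<' := by simpa using congrArg List.head? hl
      exact absurd (this ▸ hys ▸ List.mem_cons_self) h1
    | cons x l' =>
      have hl' : l' ++ p ++ r = g ++ ['>'] := by
        have := congrArg List.tail hl
        simpa using this
      rcases List.eq_nil_or_concat r with rfl | ⟨r', a, rfl⟩
      · have hlast : ('>' : Char) ∈ p := by
          have h3 : l' ++ p = g ++ ['>'] := by simpa using hl'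
          have : (l' ++ p).getLast? = some '>' := by rw [h3]; simp
          rw [List.getLast?_append_of_ne_nil _ hne] at this
          exact List.mem_of_getLast? this
        exact absurd hlast h2
      · have : (l' ++ p ++ r') ++ [a] = g ++ ['>'] := by
          simpa [List.append_assoc] using hl'
        have h4 := List.append_inj_left' this (by simp)
        exact ⟨l', r', by simpa [List.append_assoc] using h4⟩
  · rintro ⟨l, r, hl⟩
    exact ⟨'<' :: l, r ++ ['>'], by simp [← hl, List.append_assoc]⟩

theorem pv_isIn_wrap (p g : List Char) (hne : p ≠ []) (h1 : '<' ∉ p) (h2 : '>' ∉ p) :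
    PySem.Chars.isIn p ('<' :: (g ++ ['>'])) = PySem.Chars.isIn p g := by
  by_cases h : p <:+: g
  · rw [(PySem.Chars.isIn_iff_infix p _).mpr ((pv_infix_wrap p g hne h1 h2).mpr h),
      (PySem.Chars.isIn_iff_infix p g).mpr h]
  · rw [(PySem.Chars.isIn_eq_false_iff p _).mpr (fun hc => h ((pv_infix_wrap p g hne h1 h2).mp hc)),
      (PySem.Chars.isIn_eq_false_iff p g).mpr h]

theorem pv_go_out (s : List Char) : ∀ cur buf intag tagbuf out,
    decode_html_alt_go s cur buf intag tagbuf out = out ++ decode_html_alt_go s cur buf intag tagbuf [] := by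
  induction s with
  | nil =>
    intro cur buf intag tagbuf out
    simp only [decode_html_alt_go]
    split_ifs <;> simp
  | cons ch rest ih =>
    intro cur buf intag tagbuf out
    simp only [decode_html_alt_go]
    split_ifs
    · rw [ih, ih (out := [])]
    · rw [ih, ih (out := [])]
    · rw [ih (out := out ++ _), ih (out := [] ++ _)]
      simp
    · rw [ih, ih (out := [])]

theorem pv_go_text (t : List Char) (h : '<' ∉ t) : ∀ cur buf out,
    decode_html_alt_go t cur buf false [] out
      = out ++ (if buf ++ t = [] then [] else [decode_html_alt_emit cur (buf ++ t)]) := by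
  induction t with
  | nil =>
    intro cur buf out
    simp only [decode_html_alt_go]
    split_ifs with h1 h2 <;> simp_all
  | cons ch rest ih =>
    intro cur buf out
    have hch : ch ≠ '<' := fun hc => h (hc ▸ List.mem_cons_self)
    have hrest : '<' ∉ rest := fun hm => h (List.mem_cons_of_mem _ hm)
    simp only [decode_html_alt_go, if_neg hch, if_neg (by simp : ¬(false : Bool) = true)]
    rw [ih hrest]
    simp

theorem pv_go_open (pre : List Char) (h : '<' ∉ pre) : ∀ u cur buf out,
    decode_html_alt_go (pre ++ '<' :: u) cur buf false [] out
      = decode_html_alt_go u cur [] true [] (out ++ [decode_html_alt_emit cur (buf ++ pre)]) := by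
  induction pre with
  | nil =>
    intro u cur buf out
    simp [decode_html_alt_go]
  | cons ch rest ih =>
    intro u cur buf out
    have hch : ch ≠ '<' := fun hc => h (hc ▸ List.mem_cons_self)
    have hrest : '<' ∉ rest := fun hm => h (List.mem_cons_of_mem _ hm)
    simp only [List.cons_append, decode_html_alt_go, if_neg hch,
      if_neg (by simp : ¬(false : Bool) = true)]
    rw [ih hrest]
    simp

theorem pv_go_tag (g : List Char) (h : '>' ∉ g) : ∀ u cur buf tagbuf out,
    decode_html_alt_go (g ++ '>' :: u) cur buf true tagbuf out
      = decode_html_alt_go u (decode_html_alt_classify (tagbuf ++ g)) buf false [] out := by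
  induction g with
  | nil =>
    intro u cur buf tagbuf out
    simp [decode_html_alt_go]
  | cons ch rest ih =>
    intro u cur buf tagbuf out
    have hch : ch ≠ '>' := fun hc => h (hc ▸ List.mem_cons_self)
    have hrest : '>' ∉ rest := fun hm => h (List.mem_cons_of_mem _ hm)
    simp only [List.cons_append, decode_html_alt_go, if_neg hch]
    rw [ih hrest]
    simp

theorem pv_main (s : List Char) : ∀ fuel beg cur, beg ≤ s.length → s.length - beg < fuel →
    pvP (s.drop beg) →
    decode_html_loop s cur beg fuel = decode_html_alt_go (s.drop beg) cur [] false [] [] := by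
  intro fuel
  induction fuel with
  | zero => intro beg cur h1 h2; omega
  | succ fuel ih =>
    intro beg cur hbeg hfuel hP
    by_cases hmem : '<' ∈ s.drop beg
    · -- a '<' ahead
      obtain ⟨pre, rest, ht, hpre⟩ := pv_first_split '<' _ hmem
      have hgt : ('>' : Char) ∈ rest := hP pre rest ht
      obtain ⟨g, v, hrest, hg⟩ := pv_first_split '>' rest hgt
      have hlen : (s.drop beg).length = s.length - beg := List.length_drop
      have hlen2 : s.length - beg = pre.length + 1 + g.length + 1 + v.length := by
        rw [← hlen, ht, hrest]; simp; omega
      have hfind : PySem.Chars.find (s.drop beg) ['<'] = (pre.length : Int) := by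
        rw [ht]; exact pv_find_first _ _ _ hpre
      have he : PySem.Chars.findFrom s ['<'] (beg : Int) none = ((beg + pre.length : Nat) : Int) := by
        rw [PySem.Chars.findFrom_natCast s ['<'] beg hbeg, hfind]
        simp
      set m : Nat := beg + pre.length with hm
      have hmle : m ≤ s.length := by omega
      have hdropm : s.drop m = '<' :: rest := by
        rw [hm, ← List.drop_drop, ht, List.drop_left]
      have hdropm2 : s.drop m = ('<' :: g) ++ '>' :: v := by
        rw [hdropm, hrest]; rfl
      have hng : ('>' : Char) ∉ '<' :: g := by
        simp only [List.mem_cons, not_or]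
        exact ⟨by decide, hg⟩
      have hfind2 : PySem.Chars.find (s.drop m) ['>'] = ((g.length + 1 : Nat) : Int) := by
        rw [hdropm2, pv_find_first '>' ('<' :: g) v hng]
        simp
      have he2 : PySem.Chars.findFrom s ['>'] ((m : Nat) : Int) none
          = (((m + g.length + 1 : Nat)) : Int) := by
        rw [PySem.Chars.findFrom_natCast s ['>'] m hmle, hfind2]
        rw [if_neg (by omega)]
        omega
      set n : Nat := m + g.length + 1 with hn
      have htag : PySem.Chars.slice s (some ((m : Nat) : Int)) (some (((n : Nat) : Int) + 1))
          = '<' :: (g ++ ['>']) := by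
        have hcast : ((n : Nat) : Int) + 1 = ((m : Nat) : Int) + ((g.length + 2 : Nat) : Int) := by
          push_cast; omega
        rw [hcast]
        simp only [PySem.Chars.slice_eq_listSlice, PySem.List.slice_natCast_add]
        rw [hdropm2]
        have h21 : g.length + 2 = ('<' :: g).length + 1 := by simp
        rw [h21, List.take_length_add_append 1]
        simp
      have hseg : PySem.Chars.slice s (some ((beg : Nat) : Int)) (some ((m : Nat) : Int)) = pre := by
        have hcast : ((m : Nat) : Int) = ((beg : Nat) : Int) + ((pre.length : Nat) : Int) := by
          omega
        rw [hcast]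
        simp only [PySem.Chars.slice_eq_listSlice, PySem.List.slice_natCast_add]
        rw [ht, List.take_left]
      have hcur : (if PySem.Chars.isIn "italic".toList ('<' :: (g ++ ['>'])) then some "subtype".toList
          else if PySem.Chars.isIn "bold".toList ('<' :: (g ++ ['>'])) then some "keyword".toList
          else none) = decode_html_alt_classify g := by
        rw [pv_isIn_wrap _ g (by decide) (by decide) (by decide),
          pv_isIn_wrap _ g (by decide) (by decide) (by decide)]
        rfl
      have hdropn : s.drop (n + 1) = v := by
        have hnm : n + 1 = m + ('<' :: g ++ ['>']).length := by simp [hn]; omega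
        rw [hnm, ← List.drop_drop, hdropm2]
        have hsplit : ('<' :: g) ++ '>' :: v = (('<' :: g) ++ ['>']) ++ v := by simp
        rw [hsplit]
        have hlensplit : ('<' :: g ++ ['>']).length = (('<' :: g) ++ ['>']).length := by simp
        rw [hlensplit, List.drop_left]
      have htn : ((((n : Nat)) : Int) + 1).toNat = n + 1 := by omega
      have hPv : pvP (s.drop (n + 1)) := by
        rw [hdropn]
        exact pvP_suffix (pre ++ '<' :: g ++ ['>']) (s.drop beg) v
          (by rw [ht, hrest]; simp) hP
      have hrec := ih (n + 1) (decode_html_alt_classify g) (by omega) (by omega) hPv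
      rw [hdropn] at hrec
      -- LHS
      simp only [decode_html_loop, he, he2]
      rw [if_pos (by positivity : (0:Int) ≤ ((m : Nat) : Int))]
      rw [if_neg (by omega : ¬ (((m + g.length + 1 : Nat)) : Int) = -1)]
      have hn' : (((m + g.length + 1 : Nat)) : Int) = ((n : Nat) : Int) := by rw [hn]
      rw [hn', htag, hcur, htn, hseg, hrec]
      -- RHS
      rw [ht, hrest, pv_go_open pre hpre, pv_go_tag g hg]
      simp only [List.nil_append]
      rw [pv_go_out v (decode_html_alt_classify g) [] false [] [decode_html_alt_emit cur pre]]
      cases cur <;> simp [decode_html_alt_emit]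
    · -- no '<' ahead
      have hfind : PySem.Chars.find (s.drop beg) ['<'] = -1 := pv_find_none _ _ hmem
      have he : PySem.Chars.findFrom s ['<'] (beg : Int) none = -1 := by
        rw [PySem.Chars.findFrom_natCast s ['<'] beg hbeg, hfind]; simp
      have hsl : PySem.Chars.slice s (some (beg : Int)) none = s.drop beg := by
        simp [PySem.List.slice_from_natCast]
      rw [pv_go_text _ hmem]
      simp only [decode_html_loop, he, hsl]
      norm_num
      by_cases hlt : beg < s.length
      · have hne : s.drop beg ≠ [] := by
          intro hn; have := List.drop_eq_nil_iff.mp hn; omega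
        rw [if_pos hlt, if_neg (by simpa using hne)]
        cases cur <;> simp [decode_html_alt_emit]
      · have hnil : s.drop beg = [] := List.drop_eq_nil_iff.mpr (by omega)
        rw [if_neg hlt, if_pos (by simpa using hnil)]

-- ===== VERDICT (by name: the statement is the Claim_ definition above) =====
theorem decode_html_spec : Claim_equal_decode_html := by
  intro text _ hpre
  unfold Spec_decode_html decode_html decode_html_alt
  have := pv_main text.toList (text.toList.length + 1) 0 none (by omega) (by omega)
    (by simpa using pvP_of_pre text hpre)
  simpa using this
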